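-- pv_equiv track=rewrite | github.com/philipsinnott/leetcode | valid_parentheses.py | isValidHelper
-- ===== SOURCE A (Python) =====
-- def isValidHelper(s: str) -> tuple:
--     reg, cur, squ = 0, 0, 0
--     re, cu, sq = ["(", ")"], ["{", "}"], ["[", "]"]
--     for i in s:
--         if i in re:
--             reg += 1
--         elif i in cu:
--             cur += 1
--         elif i in sq:
--             squ += 1
--     return reg, cur, squ
-- ===== SOURCE B (Python) =====
-- def isValidHelper(s: str) -> tuple:
--     # Six independent built-in substring-count passes instead of one branching scan.
--     return (s.count("(") + s.count(")"),
--             s.count("{") + s.count("}"),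
--             s.count("[") + s.count("]"))
-- ===== Notes on version B (the rewrite author's own statement) =====
-- stated objective: idiomatic
-- what changed: Replaces the single branching Python-level scan with three per-character counters by six independent str.count passes, one per bracket character, summed pairwise; correct because the categories are disjoint and counting each character separately is order-independent.
import Mathlib
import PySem

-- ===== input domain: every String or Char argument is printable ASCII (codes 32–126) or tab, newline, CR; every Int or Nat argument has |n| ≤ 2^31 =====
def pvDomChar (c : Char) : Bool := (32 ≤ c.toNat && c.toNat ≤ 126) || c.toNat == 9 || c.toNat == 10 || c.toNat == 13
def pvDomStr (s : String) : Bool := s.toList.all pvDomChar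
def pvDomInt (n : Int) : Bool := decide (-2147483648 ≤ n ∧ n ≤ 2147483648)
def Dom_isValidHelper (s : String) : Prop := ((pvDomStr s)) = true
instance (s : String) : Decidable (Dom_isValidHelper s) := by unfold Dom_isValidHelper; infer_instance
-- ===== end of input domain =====

-- B replaces A's single branching three-counter scan with six independent str.count passes summed pairwise; objective: idiomatic.


-- ===== PORT A =====
-- A's loop body: classify one character against re / cu / sq and bump the matching counter.
def pvStepA (acc : Int × Int × Int) (i : Char) : Int × Int × Int :=
  if ['(', ')'].contains i then (acc.1 + 1, acc.2.1, acc.2.2)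
  else if ['{', '}'].contains i then (acc.1, acc.2.1 + 1, acc.2.2)
  else if ['[', ']'].contains i then (acc.1, acc.2.1, acc.2.2 + 1)
  else acc

def isValidHelper (s : String) : Int × Int × Int :=
  s.toList.foldl pvStepA (0, 0, 0)

-- ===== PORT B =====
-- six independent s.count(<char>) passes (PySem.Str.count), summed pairwise
def isValidHelper_alt (s : String) : Int × Int × Int :=
  ((PySem.Str.count s "(" : Int) + (PySem.Str.count s ")" : Int),
   (PySem.Str.count s "{" : Int) + (PySem.Str.count s "}" : Int),
   (PySem.Str.count s "[" : Int) + (PySem.Str.count s "]" : Int))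

-- ===== PRECONDITION & SPEC =====
def Spec_isValidHelper (s : String) (out : Int × Int × Int) : Prop := out = isValidHelper_alt s
instance (s : String) (out : Int × Int × Int) : Decidable (Spec_isValidHelper s out) := by unfold Spec_isValidHelper; infer_instance

-- ===== CLAIM (what is proved, stated in full; the proofs are below) =====
def Claim_equal_isValidHelper : Prop := ∀ (s : String), Dom_isValidHelper s → Spec_isValidHelper s (isValidHelper s)

-- ===== LEMMAS AND PROOFS =====

-- PySem's substring counter, on a single-character needle, counts occurrences of that character.
theorem go_single (c : Char) (l : List Char) : ∀ (fuel acc : Nat), l.length ≤ fuel →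
    PySem.Chars.count.go [c] fuel l acc = acc + l.count c := by
  induction l with
  | nil => intro fuel acc _; cases fuel <;> simp [PySem.Chars.count.go]
  | cons x xs ih =>
    intro fuel acc h
    cases fuel with
    | zero => simp at h
    | succ n =>
      rw [PySem.Chars.count.go]
      by_cases hx : x = c
      · subst hx
        simp [List.isPrefixOf, ih n (acc + 1) (by simpa using h)]
        omega
      · have : [c].isPrefixOf (x :: xs) = false := by
          simp [List.isPrefixOf]; exact fun h => absurd h.symm hx
        simp [this, hx, ih n acc (by simpa using h)]

theorem count_single (s : List Char) (c : Char) : PySem.Chars.count s [c] = s.count c := by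
  simp [PySem.Chars.count, go_single c s s.length 0 le_rfl]

-- A's fold, from any starting accumulator, adds the per-category character counts.
theorem foldA_counts (l : List Char) (r c q : Int) :
    l.foldl pvStepA (r, c, q)
    = (r + l.count '(' + l.count ')',
       c + l.count '{' + l.count '}',
       q + l.count '[' + l.count ']') := by
  induction l generalizing r c q with
  | nil => simp
  | cons x xs ih =>
    rw [List.foldl_cons]
    by_cases h1 : x = '('
    · subst h1; rw [show pvStepA (r, c, q) '(' = (r + 1, c, q) from rfl, ih]
      simp; omega
    by_cases h2 : x = ')'
    · subst h2; rw [show pvStepA (r, c, q) ')' = (r + 1, c, q) from rfl, ih]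
      simp; omega
    by_cases h3 : x = '{'
    · subst h3; rw [show pvStepA (r, c, q) '{' = (r, c + 1, q) from rfl, ih]
      simp; omega
    by_cases h4 : x = '}'
    · subst h4; rw [show pvStepA (r, c, q) '}' = (r, c + 1, q) from rfl, ih]
      simp; omega
    by_cases h5 : x = '['
    · subst h5; rw [show pvStepA (r, c, q) '[' = (r, c, q + 1) from rfl, ih]
      simp; omega
    by_cases h6 : x = ']'
    · subst h6; rw [show pvStepA (r, c, q) ']' = (r, c, q + 1) from rfl, ih]
      simp; omega
    · rw [show pvStepA (r, c, q) x = (r, c, q) by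
        simp [pvStepA, h1, h2, h3, h4, h5, h6], ih]
      simp [h1, h2, h3, h4, h5, h6]

-- ===== VERDICT (by name: the statement is the Claim_ definition above) =====
theorem isValidHelper_spec : Claim_equal_isValidHelper := by
  intro s _
  show isValidHelper s = isValidHelper_alt s
  rw [isValidHelper, foldA_counts]
  simp [isValidHelper_alt, PySem.Str.count, count_single]
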